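-- pv_equiv track=rewrite | github.com/kokiSAT0/MakeGridTrace | src/sat_unique.py | _even_parity_clauses
-- ===== SOURCE A (Python) =====
-- from typing import List
-- import itertools
--
-- def _even_parity_clauses(lits: List[int]) -> List[List[int]]:
--     """偶数個の真を強制する制約を生成"""
--     clauses: List[List[int]] = []
--     for bits in itertools.product([0, 1], repeat=len(lits)):
--         # 奇数個のときはその割り当てを禁止する
--         if sum(bits) % 2 == 1:
--             clause = []
--             for lit, bit in zip(lits, bits):
--                 clause.append(-lit if bit else lit)
--             clauses.append(clause)
--     return clauses
-- ===== SOURCE B (Python) =====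
-- from typing import List
--
-- def _even_parity_clauses(lits: List[int]) -> List[List[int]]:
--     """偶数個の真を強制する制約を生成"""
--     def go(i):
--         # clauses forbidding odd / even parity assignments of lits[i:]
--         if i == len(lits):
--             return [], [[]]
--         odd, even = go(i + 1)
--         x = lits[i]
--         return ([[x] + c for c in odd] + [[-x] + c for c in even],
--                 [[x] + c for c in even] + [[-x] + c for c in odd])
--     return go(0)[0]
-- ===== Notes on version B (the rewrite author's own statement) =====
-- stated objective: alternative
-- what changed: B replaces the enumerate-all-2^n-tuples-and-filter loop by a mutual recursion on the literal list that builds the odd-parity and even-parity clause lists together, prepending the positive/negated literal to the recursively built tails; no bit tuples are materialised.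
import Mathlib
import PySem

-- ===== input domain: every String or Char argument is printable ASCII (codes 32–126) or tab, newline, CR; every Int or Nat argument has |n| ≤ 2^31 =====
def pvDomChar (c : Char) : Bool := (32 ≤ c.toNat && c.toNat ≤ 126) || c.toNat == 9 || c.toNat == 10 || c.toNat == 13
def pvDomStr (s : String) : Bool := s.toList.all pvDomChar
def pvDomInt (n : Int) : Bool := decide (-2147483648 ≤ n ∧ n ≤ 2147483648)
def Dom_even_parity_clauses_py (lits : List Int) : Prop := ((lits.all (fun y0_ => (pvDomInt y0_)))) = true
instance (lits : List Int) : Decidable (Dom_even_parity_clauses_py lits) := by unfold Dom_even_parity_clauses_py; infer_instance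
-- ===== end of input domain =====

-- B builds the odd/even parity clause lists by recursion on the literal list instead of
-- enumerating and filtering all 2^n bit tuples (objective: alternative algorithm).

-- itertools.product([0,1], repeat=n): all 0/1 tuples in lexicographic order (leftmost slowest)
def pyProduct01 : Nat → List (List Int)
  | 0 => [[]]
  | n + 1 => (pyProduct01 n).map (fun t => 0 :: t) ++ (pyProduct01 n).map (fun t => 1 :: t)

-- ===== PORT A =====
def even_parity_clauses_py (lits : List Int) : List (List Int) :=
  (pyProduct01 lits.length).foldl
    (fun clauses bits =>
      if PySem.Int.mod bits.sum 2 == 1 then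
        clauses ++
          [(lits.zip bits).foldl
            (fun clause lb => clause ++ [if lb.2 ≠ 0 then -lb.1 else lb.1]) []]
      else clauses) []

-- ===== PORT B =====
-- Source B's inner `go(i)` recurses on the suffix lits[i:]; ported as structural recursion on the list.
def pvGo : List Int → (List (List Int)) × (List (List Int))
  | [] => ([], [[]])
  | x :: rest =>
    let oe := pvGo rest
    ((oe.1.map (fun c => x :: c)) ++ (oe.2.map (fun c => -x :: c)),
     (oe.2.map (fun c => x :: c)) ++ (oe.1.map (fun c => -x :: c)))

def even_parity_clauses_py_alt (lits : List Int) : List (List Int) :=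
  (pvGo lits).1

-- ===== PRECONDITION & SPEC =====
def Spec_even_parity_clauses_py (lits : List Int) (out : List (List Int)) : Prop := out = even_parity_clauses_py_alt lits
instance (lits : List Int) (out : List (List Int)) : Decidable (Spec_even_parity_clauses_py lits out) := by unfold Spec_even_parity_clauses_py; infer_instance

-- ===== CLAIM (what is proved, stated in full; the proofs are below) =====
def Claim_equal_even_parity_clauses_py : Prop := ∀ (lits : List Int), Dom_even_parity_clauses_py lits → Spec_even_parity_clauses_py lits (even_parity_clauses_py lits)

-- ===== LEMMAS AND PROOFS =====

theorem pvMod2 (a : Int) : PySem.Int.mod a 2 = a % 2 :=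
  PySem.Int.mod_eq_emod_of_pos (by norm_num)

-- A's outer loop: append-under-test is filter-then-map
theorem pvFoldFilter (f : List Int → List Int) (l : List (List Int)) (acc : List (List Int)) :
    l.foldl (fun cl bits => if bits.sum % 2 == 1 then cl ++ [f bits] else cl) acc
      = acc ++ (l.filter (fun bits => bits.sum % 2 == 1)).map f := by
  induction l generalizing acc with
  | nil => simp
  | cons t rest ih =>
    rw [List.foldl_cons, ih, List.filter_cons]
    by_cases h : (t.sum % 2 == 1) = true <;> simp [h]

-- A's inner loop: plain append loop is map
theorem pvFoldMap {α β : Type} (f : α → β) (l : List α) (acc : List β) :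
    l.foldl (fun c x => c ++ [f x]) acc = acc ++ l.map f := by
  induction l generalizing acc with
  | nil => simp
  | cons t rest ih => simp [ih]

-- pulling a constant head out of a mapped function
theorem pvMapCons (y : Int) (g : List Int → List Int) (l : List (List Int)) :
    l.map (fun t => y :: g t) = (l.map g).map (fun c => y :: c) := by
  simp

-- the filtered halves of A's enumeration are exactly B's recursive pair
theorem pvOE (lits : List Int) :
    ((pyProduct01 lits.length).filter (fun bits => bits.sum % 2 == 1)).map
        (fun bits => (lits.zip bits).map (fun lb => if lb.2 ≠ 0 then -lb.1 else lb.1))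
      = (pvGo lits).1
    ∧ ((pyProduct01 lits.length).filter (fun bits => bits.sum % 2 == 0)).map
        (fun bits => (lits.zip bits).map (fun lb => if lb.2 ≠ 0 then -lb.1 else lb.1))
      = (pvGo lits).2 := by
  induction lits with
  | nil => constructor <;> rfl
  | cons x xs ih =>
    have h1 : ∀ t : List Int, ((((1:Int) :: t).sum % 2 == 1) : Bool)
        = ((t.sum % 2 == 0) : Bool) := by
      intro t
      have h2 : ((1:Int) + t.sum) % 2 = 1 - t.sum % 2 := by
        have := Int.emod_two_eq t.sum; omega
      have h := Int.emod_two_eq t.sum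
      simp only [List.sum_cons, h2]
      rcases h with h | h <;> simp [h]
    have h0 : ∀ t : List Int, ((((0:Int) :: t).sum % 2 == 1) : Bool)
        = ((t.sum % 2 == 1) : Bool) := by
      intro t; simp
    have h1' : ∀ t : List Int, ((((1:Int) :: t).sum % 2 == 0) : Bool)
        = ((t.sum % 2 == 1) : Bool) := by
      intro t
      have h2 : ((1:Int) + t.sum) % 2 = 1 - t.sum % 2 := by
        have := Int.emod_two_eq t.sum; omega
      have h := Int.emod_two_eq t.sum
      simp only [List.sum_cons, h2]
      rcases h with h | h <;> simp [h]
    have h0' : ∀ t : List Int, ((((0:Int) :: t).sum % 2 == 0) : Bool)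
        = ((t.sum % 2 == 0) : Bool) := by
      intro t; simp
    have hA0 : (if (0:Int) ≠ 0 then -x else x) = x := by norm_num
    have hA1 : (if (1:Int) ≠ 0 then -x else x) = -x := by norm_num
    constructor <;>
    · simp only [List.length_cons, pyProduct01, List.filter_append, List.filter_map,
        List.map_append, List.map_map, Function.comp_def, h0, h1, h0', h1',
        List.zip_cons_cons, List.map_cons, pvGo]
      simp only [hA0, hA1, pvMapCons]
      rw [ih.1, ih.2]

-- ===== VERDICT (by name: the statement is the Claim_ definition above) =====
theorem even_parity_clauses_py_spec : Claim_equal_even_parity_clauses_py := by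
  intro lits _
  unfold Spec_even_parity_clauses_py even_parity_clauses_py even_parity_clauses_py_alt
  simp only [pvMod2, pvFoldFilter, pvFoldMap, List.nil_append]
  exact (pvOE lits).1
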